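-- pv_equiv track=rewrite | github.com/TienNHM/Python-Course | W02/Caro-2.py | KiemTraLine
-- ===== SOURCE A (Python) =====
-- def KiemTraLine(line, player):
--     dem = 0
--     for i in line:
--         if i == player:
--             dem += 1
--             if dem == 5:
--                 return True
--         else:
--             dem = 0
--     return False
-- ===== SOURCE B (Python) =====
-- def KiemTraLine(line, player):
--     # run-based scan: peel off maximal runs of equal elements
--     while line:
--         head, rest = line[0], line[1:]
--         k = 0
--         while k < len(rest) and rest[k] == head:
--             k += 1
--         if head == player and k + 1 >= 5:
--             return True
--         line = rest[k:]
--     return False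
-- ===== Notes on version B (the rewrite author's own statement) =====
-- stated objective: alternative
-- what changed: B iterates over maximal runs of equal consecutive elements (two-level run scan) instead of A's resettable running counter, testing each run's length against 5.
import Mathlib
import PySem

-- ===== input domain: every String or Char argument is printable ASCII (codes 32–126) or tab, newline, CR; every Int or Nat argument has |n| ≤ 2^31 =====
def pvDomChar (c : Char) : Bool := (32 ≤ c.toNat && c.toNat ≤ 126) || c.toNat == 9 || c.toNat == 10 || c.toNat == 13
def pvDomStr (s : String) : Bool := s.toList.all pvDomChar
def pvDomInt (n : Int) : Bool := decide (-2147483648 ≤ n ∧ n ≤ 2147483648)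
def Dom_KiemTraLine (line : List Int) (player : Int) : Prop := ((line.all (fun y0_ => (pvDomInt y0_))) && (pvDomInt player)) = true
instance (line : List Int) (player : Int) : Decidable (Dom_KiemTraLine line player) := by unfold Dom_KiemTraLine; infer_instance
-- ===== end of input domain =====

-- B replaces A's resettable running counter with a scan over maximal runs of
-- equal consecutive elements (objective: alternative decomposition, same cost).

-- ===== PORT A =====
-- A's for-loop with the counter `dem`; returning `true` inside the loop is the
-- recursion's `true` branch.
def KiemTraLineLoop (player : Int) (line : List Int) (dem : Int) : Bool :=
  match line with
  | [] => false
  | i :: rest =>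
    if i == player then
      if dem + 1 == 5 then true else KiemTraLineLoop player rest (dem + 1)
    else
      KiemTraLineLoop player rest 0

def KiemTraLine (line : List Int) (player : Int) : Bool :=
  KiemTraLineLoop player line 0

-- ===== PORT B =====
-- B's outer while-loop: peel one maximal run per iteration.  The inner index
-- scan `while k < len(rest) and rest[k] == head` is the structural scan
-- takeWhile/dropWhile over `rest`.
def KiemTraLine_alt (line : List Int) (player : Int) : Bool :=
  match line with
  | [] => false
  | head :: rest =>
    let k := (rest.takeWhile (· == head)).length
    if head == player && decide (k + 1 ≥ 5) then true
    else KiemTraLine_alt (rest.dropWhile (· == head)) player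
termination_by line.length
decreasing_by
  simp only [List.length_cons]
  exact Nat.lt_succ_of_le (List.length_dropWhile_le _ _)

-- ===== PRECONDITION & SPEC =====
def Spec_KiemTraLine (line : List Int) (player : Int) (out : Bool) : Prop := out = KiemTraLine_alt line player
instance (line : List Int) (player : Int) (out : Bool) : Decidable (Spec_KiemTraLine line player out) := by unfold Spec_KiemTraLine; infer_instance

-- ===== CLAIM (what is proved, stated in full; the proofs are below) =====
def Claim_equal_KiemTraLine : Prop := ∀ (line : List Int) (player : Int), Dom_KiemTraLine line player → Spec_KiemTraLine line player (KiemTraLine line player)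

-- ===== LEMMAS AND PROOFS =====

-- A's loop over a line, when the counter stands at `dem` with `0 ≤ dem < 5`:
-- it answers true iff the leading player-run completes 5, else restarts with 0
-- after that run.
lemma loopA_run (player : Int) (line : List Int) (dem : Int)
    (h0 : 0 ≤ dem) (h5 : dem < 5) :
    KiemTraLineLoop player line dem =
      if ((line.takeWhile (· == player)).length : Int) + dem ≥ 5 then true
      else KiemTraLineLoop player (line.dropWhile (· == player)) 0 := by
  induction line generalizing dem with
  | nil => rw [if_neg (by simp; omega)]; rfl
  | cons x xs ih =>
    by_cases hx : (x == player) = true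
    · rw [List.takeWhile_cons_of_pos (p := fun y => y == player) hx,
        List.dropWhile_cons_of_pos (p := fun y => y == player) hx,
        show KiemTraLineLoop player (x :: xs) dem =
          (if dem + 1 == 5 then true else KiemTraLineLoop player xs (dem + 1))
          from by simp [KiemTraLineLoop, hx]]
      by_cases hd : (dem + 1 : Int) = 5
      · rw [if_pos (by simp [hd]), if_pos (by simp only [List.length_cons]; push_cast; omega)]
      · rw [if_neg (by simpa using hd), ih (dem + 1) (by omega) (by omega)]
        have hiff : (((xs.takeWhile (· == player)).length : Int) + (dem + 1) ≥ 5) ↔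
            (((x :: xs.takeWhile (· == player)).length : Int) + dem ≥ 5) := by
          simp only [List.length_cons]; push_cast; omega
        simp only [hiff]
    · rw [List.takeWhile_cons_of_neg (p := fun y => y == player) hx,
        List.dropWhile_cons_of_neg (p := fun y => y == player) hx,
        if_neg (by simp; omega)]
      simp [KiemTraLineLoop, hx]

-- Skipping a maximal run of a non-player value leaves A's loop (at counter 0)
-- unchanged.
lemma loopA_skip (player x : Int) (hx : ¬ (x == player) = true) (xs : List Int) :
    KiemTraLineLoop player xs 0 =
      KiemTraLineLoop player (xs.dropWhile (· == x)) 0 := by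
  induction xs with
  | nil => simp
  | cons y ys ih =>
    by_cases hy : (y == x) = true
    · have hyp : ¬ (y == player) = true := by simp at hy hx ⊢; omega
      rw [List.dropWhile_cons_of_pos (p := fun z => z == x) hy, ← ih]
      simp [KiemTraLineLoop, hyp]
    · rw [List.dropWhile_cons_of_neg (p := fun z => z == x) hy]

lemma main_equiv (line : List Int) (player : Int) :
    KiemTraLineLoop player line 0 = KiemTraLine_alt line player := by
  match line with
  | [] => simp [KiemTraLineLoop, KiemTraLine_alt]
  | x :: xs =>
    rw [KiemTraLine_alt]
    by_cases hx : (x == player) = true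
    · have hxv : x = player := by simpa using hx
      subst hxv
      rw [loopA_run x (x :: xs) 0 (by omega) (by omega),
        List.takeWhile_cons_of_pos (p := fun y => y == x) (by simp),
        List.dropWhile_cons_of_pos (p := fun y => y == x) (by simp)]
      simp only [beq_self_eq_true, Bool.true_and]
      by_cases h5 : (xs.takeWhile (· == x)).length + 1 ≥ 5
      · rw [if_pos (by simp only [List.length_cons]; push_cast; omega),
          if_pos (by simpa using h5)]
      · rw [if_neg (by simp only [List.length_cons]; push_cast; omega),
          if_neg (by simpa using h5)]
        exact main_equiv (xs.dropWhile (· == x)) x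
    · rw [if_neg (by simp [hx])]
      have step : KiemTraLineLoop player (x :: xs) 0 = KiemTraLineLoop player xs 0 := by
        simp [KiemTraLineLoop, hx]
      rw [step, loopA_skip player x hx xs]
      exact main_equiv (xs.dropWhile (· == x)) player
termination_by line.length
decreasing_by
  all_goals
    simp only [List.length_cons]
    exact Nat.lt_succ_of_le (List.length_dropWhile_le _ _)

-- ===== VERDICT (by name: the statement is the Claim_ definition above) =====
theorem KiemTraLine_spec : Claim_equal_KiemTraLine := by
  intro line player _
  unfold Spec_KiemTraLine KiemTraLine
  exact main_equiv line player
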